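-- pv_equiv track=rewrite | github.com/pamelamontteiro/UFSC | INE5402/PROVA/Prova III/2797.py | verificar_fileiro_do_lado
-- ===== SOURCE A (Python) =====
-- def verificar_fileiro_do_lado(provas):
--     tudo_ok = True
--     for i in range(len(provas)):
--         fileira_da_esquerda = i - 1
--         fileira_da_direita = i + 1
--         if 1 in provas[i] or 2 in provas[i]:
--             if fileira_da_esquerda >= 0:
--                 if 1 in provas[fileira_da_esquerda] or 2 in provas[fileira_da_esquerda]:
--                     tudo_ok = False
--                     break
--
--             if fileira_da_direita < len(provas):
--                 if 1 in provas[fileira_da_direita] or 2 in provas[fileira_da_direita]: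
--                     tudo_ok = False
--                     break
--     return tudo_ok
-- ===== SOURCE B (Python) =====
-- def verificar_fileiro_do_lado(provas):
--     marcadas = [i for i, fileira in enumerate(provas) if 1 in fileira or 2 in fileira]
--     return all(b - a > 1 for a, b in zip(marcadas, marcadas[1:]))
-- ===== Notes on version B (the rewrite author's own statement) =====
-- stated objective: alternative
-- what changed: Instead of scanning rows and inspecting each marked row's left and right neighbours with an early break, B first collects the indices of all marked rows and then checks that every pair of consecutive marked indices is more than 1 apart.
import Mathlib
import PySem

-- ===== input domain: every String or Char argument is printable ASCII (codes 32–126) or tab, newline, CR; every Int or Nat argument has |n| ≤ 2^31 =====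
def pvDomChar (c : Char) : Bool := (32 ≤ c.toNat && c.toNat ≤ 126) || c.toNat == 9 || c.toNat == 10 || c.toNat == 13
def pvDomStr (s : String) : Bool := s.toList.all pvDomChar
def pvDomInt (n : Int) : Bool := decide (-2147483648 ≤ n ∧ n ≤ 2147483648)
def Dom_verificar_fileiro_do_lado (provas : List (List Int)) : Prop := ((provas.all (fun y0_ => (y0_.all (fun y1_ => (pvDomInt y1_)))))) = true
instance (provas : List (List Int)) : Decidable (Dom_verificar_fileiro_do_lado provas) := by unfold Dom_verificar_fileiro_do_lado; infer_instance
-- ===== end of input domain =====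

-- B replaces A's per-row neighbour inspection by first collecting the indices of all
-- marked rows and then checking consecutive marked indices differ by more than 1 (objective: alternative).

-- `1 in row or 2 in row` (the identical membership test both Pythons write)
def pvMark (row : List Int) : Bool := row.contains 1 || row.contains 2

-- ===== PORT A =====
-- A's `for i in range(len(provas))` loop with its early `break`, as recursion on the index
-- (fuel = number of indices left to visit, so the recursion is structural)
def pvLoopA (provas : List (List Int)) : Nat → Nat → Bool
  | 0, _ => true
  | fuel + 1, i =>
    if h : i < provas.length then
      if pvMark provas[i] then
        -- fileira_da_esquerda = i - 1 ≥ 0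
        if decide (1 ≤ i) && pvMark (provas.getD (i - 1) []) then false
        -- fileira_da_direita = i + 1 < len(provas)
        else if decide (i + 1 < provas.length) && pvMark (provas.getD (i + 1) []) then false
        else pvLoopA provas fuel (i + 1)
      else pvLoopA provas fuel (i + 1)
    else true

def verificar_fileiro_do_lado (provas : List (List Int)) : Bool :=
  pvLoopA provas provas.length 0

-- ===== PORT B =====
-- `marcadas = [i for i, fileira in enumerate(provas) if 1 in fileira or 2 in fileira]`
def pvMarcadas (provas : List (List Int)) : List Int :=
  ((PySem.List.enumerate provas).filter (fun p => pvMark p.2)).map (fun p => p.1)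

-- `all(b - a > 1 for a, b in zip(marcadas, marcadas[1:]))`
def verificar_fileiro_do_lado_alt (provas : List (List Int)) : Bool :=
  ((pvMarcadas provas).zip (pvMarcadas provas).tail).all (fun p => decide (p.2 - p.1 > 1))

-- ===== PRECONDITION & SPEC =====
def Spec_verificar_fileiro_do_lado (provas : List (List Int)) (out : Bool) : Prop := out = verificar_fileiro_do_lado_alt provas
instance (provas : List (List Int)) (out : Bool) : Decidable (Spec_verificar_fileiro_do_lado provas out) := by unfold Spec_verificar_fileiro_do_lado; infer_instance

-- ===== CLAIM =====
def Claim_equal_verificar_fileiro_do_lado : Prop := ∀ (provas : List (List Int)), Dom_verificar_fileiro_do_lado provas → Spec_verificar_fileiro_do_lado provas (verificar_fileiro_do_lado provas)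

-- ===== LEMMAS AND PROOFS =====

-- intermediate form of A's loop: a forward pass carrying the previous row's mark flag
def pvLoopP (prev : Bool) (provas : List (List Int)) : Bool :=
  match provas with
  | [] => true
  | r :: rest => if prev && pvMark r then false else pvLoopP (pvMark r) rest

-- clean adjacency predicate: no two consecutive rows both marked
def pvChk : List (List Int) → Bool
  | a :: b :: t => !(pvMark a && pvMark b) && pvChk (b :: t)
  | _ => true

-- gap predicate on an index list: every consecutive pair differs by more than 1
def pvG : List Int → Bool
  | x :: y :: t => decide (y - x > 1) && pvG (y :: t)
  | _ => true

-- generalized marked-index list starting at index s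
def pvMF (s : Int) (l : List (List Int)) : List Int :=
  ((PySem.List.enumerate l s).filter (fun p => pvMark p.2)).map (fun p => p.1)

-- the `prev` flag the pass carries when its scan reaches row i
def pvPrev (provas : List (List Int)) (i : Nat) : Bool :=
  if i = 0 then false else pvMark (provas.getD (i - 1) [])

lemma pvGetD_eq (provas : List (List Int)) (j : Nat) (h : j < provas.length) :
    provas.getD j [] = provas[j] := by
  simp [List.getD, List.getElem?_eq_getElem h]

lemma pvLoopA_eq_loopP (provas : List (List Int)) :
    ∀ n i, provas.length - i ≤ n →
      pvLoopA provas n i = pvLoopP (pvPrev provas i) (provas.drop i) := by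
  intro n
  induction n with
  | zero =>
    intro i hi
    have hlen : provas.length ≤ i := by omega
    simp [pvLoopA, List.drop_eq_nil_of_le hlen, pvLoopP]
  | succ n ih =>
    intro i hi
    by_cases h : i < provas.length
    · have hdrop : provas.drop i = provas[i] :: provas.drop (i + 1) :=
        List.drop_eq_getElem_cons h
      rw [pvLoopA, hdrop]
      simp only [h, dif_pos, pvLoopP]
      have hrec := ih (i + 1) (by omega)
      have hgi : provas.getD i [] = provas[i] := pvGetD_eq provas i h
      have hnext : pvPrev provas (i + 1) = pvMark provas[i] := by
        rw [pvPrev, if_neg (Nat.succ_ne_zero i), Nat.add_sub_cancel, hgi]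
      cases hm : pvMark provas[i] with
      | false => rw [hrec, hnext, hm]; simp
      | true =>
        cases hp : pvPrev provas i with
        | true =>
          have hi0 : i ≠ 0 := by
            intro hz; rw [pvPrev, if_pos hz] at hp; exact Bool.false_ne_true hp
          have hmL : pvMark (provas.getD (i - 1) []) = true := by
            rw [pvPrev, if_neg hi0] at hp; exact hp
          have hc1 : (decide (1 ≤ i) && pvMark (provas.getD (i - 1) [])) = true := by
            rw [hmL, Bool.and_true]; exact decide_eq_true (by omega)
          rw [hc1]; simp
        | false =>
          have hc1 : (decide (1 ≤ i) && pvMark (provas.getD (i - 1) [])) = false := by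
            by_cases hz : i = 0
            · rw [hz]; simp
            · have hmL : pvMark (provas.getD (i - 1) []) = false := by
                rw [pvPrev, if_neg hz] at hp; exact hp
              rw [hmL, Bool.and_false]
          rw [hc1]
          cases hc2 : (decide (i + 1 < provas.length) && pvMark (provas.getD (i + 1) [])) with
          | true =>
            obtain ⟨h1, h2⟩ := Bool.and_eq_true_iff.mp hc2
            have h1' : i + 1 < provas.length := of_decide_eq_true h1
            have h2' : pvMark provas[i + 1] = true := by
              rw [pvGetD_eq provas (i + 1) h1'] at h2; exact h2
            rw [List.drop_eq_getElem_cons h1']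
            simp [pvLoopP, h2']
          | false => rw [hrec, hnext, hm]; simp
    · have hlen : provas.length ≤ i := by omega
      simp [pvLoopA, h, List.drop_eq_nil_of_le hlen, pvLoopP]

-- the prev-flag pass computes the adjacency predicate
lemma pvLoopP_eq_chk (l : List (List Int)) :
    ∀ prev, pvLoopP prev l =
      ((match l with | [] => true | r :: _ => !(prev && pvMark r)) && pvChk l) := by
  induction l with
  | nil => intro prev; simp [pvLoopP, pvChk]
  | cons r t ih =>
    intro prev
    show (if prev && pvMark r then false else pvLoopP (pvMark r) t)
        = (!(prev && pvMark r) && pvChk (r :: t))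
    cases hc : prev && pvMark r with
    | true => simp
    | false =>
      rw [if_neg (by simp), ih (pvMark r)]
      cases t with
      | nil => simp [pvChk]
      | cons b t' =>
        show (!(pvMark r && pvMark b) && pvChk (b :: t')) = (!false && pvChk (r :: b :: t'))
        simp [pvChk]

lemma pvMF_cons (s : Int) (r : List Int) (t : List (List Int)) :
    pvMF s (r :: t) = (if pvMark r then [s] else []) ++ pvMF (s + 1) t := by
  by_cases hm : pvMark r = true <;>
    simp [pvMF, PySem.List.enumerate_cons, hm]

-- every index in pvMF s l is at least s (stated for the head via cons shape)
lemma pvMF_head_ge : ∀ (l : List (List Int)) (s x : Int) (t' : List Int),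
    pvMF s l = x :: t' → s ≤ x := by
  intro l
  induction l with
  | nil => intro s x t' h; simp [pvMF, PySem.List.enumerate] at h
  | cons r t ih =>
    intro s x t' h
    rw [pvMF_cons] at h
    by_cases hm : pvMark r = true
    · rw [if_pos hm] at h
      simp at h
      omega
    · rw [if_neg hm] at h
      simp at h
      have := ih (s + 1) x t' h
      omega

lemma pvG_mf : ∀ (l : List (List Int)) (s : Int), pvG (pvMF s l) = pvChk l := by
  intro l
  induction l with
  | nil => intro s; simp [pvMF, PySem.List.enumerate, pvG, pvChk]
  | cons a t ih =>
    intro s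
    rw [pvMF_cons]
    by_cases hma : pvMark a = true
    · rw [if_pos hma]
      cases t with
      | nil => simp [pvMF, PySem.List.enumerate, pvG, pvChk]
      | cons b t' =>
        rw [pvMF_cons]
        by_cases hmb : pvMark b = true
        · rw [if_pos hmb]
          show pvG (s :: (s + 1) :: pvMF (s + 1 + 1) t') = pvChk (a :: b :: t')
          show (decide (s + 1 - s > 1) && pvG ((s + 1) :: pvMF (s + 1 + 1) t')) = _
          have : ¬ (s + 1 - s > 1) := by omega
          simp [pvChk, hma, hmb]
        · rw [if_neg hmb]
          have hrest : pvMF (s + 1) (b :: t') = pvMF (s + 1 + 1) t' := by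
            rw [pvMF_cons, if_neg hmb]; simp
          have hih : pvG (pvMF (s + 1) (b :: t')) = pvChk (b :: t') := ih (s + 1)
          rw [hrest] at hih
          have hchk : pvChk (a :: b :: t') = pvChk (b :: t') := by
            simp [pvChk, Bool.eq_false_iff.mpr hmb]
          rw [hchk, ← hih]
          -- goal: pvG (s :: pvMF (s+2) t') = pvG (pvMF (s+2) t')
          cases hmf : pvMF (s + 1 + 1) t' with
          | nil => simp [pvG]
          | cons x u =>
            have hx : s + 1 + 1 ≤ x := pvMF_head_ge t' (s + 1 + 1) x u hmf
            show (decide (x - s > 1) && pvG (x :: u)) = pvG (x :: u)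
            have : x - s > 1 := by omega
            simp [this]
    · rw [if_neg hma]
      simp only [List.nil_append]
      rw [ih (s + 1)]
      cases t with
      | nil => simp [pvChk]
      | cons b t' => simp [pvChk, Bool.eq_false_iff.mpr hma]

lemma pvG_eq_zip : ∀ (l : List Int),
    ((l.zip l.tail).all (fun p => decide (p.2 - p.1 > 1))) = pvG l := by
  intro l
  induction l with
  | nil => simp [pvG]
  | cons x t ih =>
    cases t with
    | nil => simp [pvG]
    | cons y t' =>
      show ((x, y) :: ((y :: t').zip t')).all _ = _
      have : ((y :: t').zip t') = ((y :: t').zip (y :: t').tail) := rfl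
      simp only [List.all_cons, this, ih]
      rfl

-- ===== VERDICT =====
theorem verificar_fileiro_do_lado_spec : Claim_equal_verificar_fileiro_do_lado := by
  intro provas _
  show verificar_fileiro_do_lado provas = verificar_fileiro_do_lado_alt provas
  have hA : verificar_fileiro_do_lado provas = pvLoopP false provas := by
    have h := pvLoopA_eq_loopP provas provas.length 0 (by omega)
    simpa [verificar_fileiro_do_lado, pvPrev] using h
  have hP : pvLoopP false provas = pvChk provas := by
    rw [pvLoopP_eq_chk provas false]
    cases provas <;> simp
  have hB : verificar_fileiro_do_lado_alt provas = pvChk provas := by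
    rw [verificar_fileiro_do_lado_alt, pvG_eq_zip]
    have : pvMarcadas provas = pvMF 0 provas := rfl
    rw [this, pvG_mf]
  rw [hA, hP, hB]
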